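-- pv_equiv track=rewrite | github.com/jonathanleek/civic-data-warehouse | apps/owner_match_review.py | owner_group_rows
-- ===== SOURCE A (Python) =====
-- from collections import defaultdict
--
-- def owner_group_rows(accepted_edges: list[tuple[str, str]]) -> list[tuple[str, str, int]]:
--     parent: dict[str, str] = {}
--
--     def find(owner_record_key: str) -> str:
--         parent.setdefault(owner_record_key, owner_record_key)
--         if parent[owner_record_key] != owner_record_key:
--             parent[owner_record_key] = find(parent[owner_record_key])
--
--         return parent[owner_record_key]
--
--     def union(left_key: str, right_key: str) -> None:
--         left_root = find(left_key)
--         right_root = find(right_key)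
--
--         if left_root == right_root:
--             return
--
--         parent[max(left_root, right_root)] = min(left_root, right_root)
--
--     for left_key, right_key in accepted_edges:
--         union(left_key, right_key)
--
--     components: dict[str, list[str]] = defaultdict(list)
--     for owner_record_key in parent:
--         components[find(owner_record_key)].append(owner_record_key)
--
--     rows = []
--     for owner_record_keys in components.values():
--         if len(owner_record_keys) < 2:
--             continue
--
--         owner_group_key = min(owner_record_keys)
--         owner_group_size = len(owner_record_keys)
--         rows.extend(
--             (owner_record_key, owner_group_key, owner_group_size)
--             for owner_record_key in owner_record_keys
--         )
--
--     return sorted(rows)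
-- ===== SOURCE B (Python) =====
-- def owner_group_rows(accepted_edges: list[tuple[str, str]]) -> list[tuple[str, str, int]]:
--     adj: dict[str, list[str]] = {}
--     for a, b in accepted_edges:
--         adj.setdefault(a, []).append(b)
--         adj.setdefault(b, []).append(a)
--
--     rows = []
--     seen = set()
--     for start in adj:
--         if start in seen:
--             continue
--         comp = [start]
--         in_comp = {start}
--         i = 0
--         while i < len(comp):
--             for v in adj[comp[i]]:
--                 if v not in in_comp:
--                     in_comp.add(v)
--                     comp.append(v)
--             i += 1
--         seen.update(comp)
--         if len(comp) >= 2: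
--             group_key = min(comp)
--             size = len(comp)
--             rows.extend((m, group_key, size) for m in comp)
--     return sorted(rows)
-- ===== Notes on version B (the rewrite author's own statement) =====
-- stated objective: alternative
-- what changed: Replaces the union-find (path-compressed parent forest with min-root unions, then a grouping pass calling find again) by a direct graph traversal: build an adjacency dict once, then for each unvisited node run a BFS that collects its whole connected component, emitting (member, min(component), size) rows for components of size >= 2.
import Mathlib
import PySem

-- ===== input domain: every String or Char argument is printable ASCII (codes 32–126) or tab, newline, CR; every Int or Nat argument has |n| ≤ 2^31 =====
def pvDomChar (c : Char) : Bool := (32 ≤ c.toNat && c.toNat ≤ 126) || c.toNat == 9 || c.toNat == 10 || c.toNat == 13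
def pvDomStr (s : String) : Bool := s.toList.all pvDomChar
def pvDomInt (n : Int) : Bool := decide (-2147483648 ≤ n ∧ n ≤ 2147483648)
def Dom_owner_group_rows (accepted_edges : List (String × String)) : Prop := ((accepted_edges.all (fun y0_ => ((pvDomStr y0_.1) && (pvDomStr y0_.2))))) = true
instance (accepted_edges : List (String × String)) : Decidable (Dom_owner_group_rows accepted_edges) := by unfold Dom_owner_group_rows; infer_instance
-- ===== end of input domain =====

-- B replaces A's union-find grouping by an adjacency-dict + BFS component search (alternative algorithm, similar cost).

-- Python's tuple comparison for sorted(rows) on (str, str, int): lexicographic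
def pvKey3 (t : String × String × Int) : Lex (String × Lex (String × Int)) :=
  toLex (t.1, toLex (t.2.1, t.2.2))

-- ===== PORT A =====
-- 'def find': recursion guarded by fuel (parent chains strictly decrease, so ample fuel is never exhausted)
def findA (fuel : Nat) (parent : PySem.Dict String String) (x : String) :
    PySem.Dict String String × String :=
  match fuel with
  | 0 => (parent, x)
  | fuel + 1 =>
    let parent := parent.setdefault x x          -- parent.setdefault(x, x)
    let px := parent.getD x x
    if px ≠ x then                                -- if parent[x] != x:
      let pr := findA fuel parent px              --   parent[x] = find(parent[x])
      (pr.1.insert x pr.2, pr.2)                  -- return parent[x]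
    else
      (parent, px)

def unionA (fuel : Nat) (parent : PySem.Dict String String) (l r : String) :
    PySem.Dict String String :=
  let f1 := findA fuel parent l
  let f2 := findA fuel f1.1 r
  if f1.2 = f2.2 then f2.1
  else f2.1.insert (max f1.2 f2.2) (min f1.2 f2.2)

def owner_group_rows (accepted_edges : List (String × String)) : List (String × String × Int) :=
  let F := accepted_edges.length * 2 + 2
  let parent := accepted_edges.foldl (fun parent e => unionA F parent e.1 e.2) PySem.Dict.empty
  let st := parent.keys.foldl
      (fun (st : PySem.Dict String String × PySem.Dict String (List String)) k =>
        let fr := findA F st.1 k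
        (fr.1, st.2.modify fr.2 [] (fun ms => ms ++ [k])))
      (parent, (PySem.Dict.empty : PySem.Dict String (List String)))
  let rows := st.2.values.foldl
      (fun rows ms =>
        if ms.length < 2 then rows
        else
          let gk := (PySem.List.min? ms (fun m => m)).getD ""
          rows ++ ms.map (fun m => (m, gk, (ms.length : Int))))
      []
  PySem.List.sorted rows pvKey3

-- ===== PORT B =====
-- BFS over 'comp' used as a queue with index i; fuel bounds the loop (i grows each round, comp.length ≤ #nodes)
def bfsB (adj : PySem.Dict String (List String)) :
    Nat → List String → PySem.Set String → Nat → List String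
  | 0, comp, _, _ => comp
  | fuel + 1, comp, inComp, i =>
    if h : i < comp.length then
      let st := (adj.getD comp[i] []).foldl
        (fun (st : List String × PySem.Set String) v =>
          if PySem.Set.contains st.2 v then st
          else (st.1 ++ [v], PySem.Set.add st.2 v))
        (comp, inComp)
      bfsB adj fuel st.1 st.2 (i + 1)
    else comp

def owner_group_rows_alt (accepted_edges : List (String × String)) : List (String × String × Int) :=
  let adj := accepted_edges.foldl
    (fun (adj : PySem.Dict String (List String)) e =>
      let adj := adj.modify e.1 [] (fun ns => ns ++ [e.2])   -- adj.setdefault(a, []).append(b)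
      adj.modify e.2 [] (fun ns => ns ++ [e.1]))             -- adj.setdefault(b, []).append(a)
    PySem.Dict.empty
  let st := adj.keys.foldl
    (fun (st : List (String × String × Int) × PySem.Set String) start =>
      if PySem.Set.contains st.2 start then st
      else
        let comp := bfsB adj (adj.size + 1) [start] (PySem.Set.add PySem.Set.empty start) 0
        let seen := PySem.Set.update st.2 comp
        if comp.length < 2 then (st.1, seen)
        else
          let gk := (PySem.List.min? comp (fun m => m)).getD ""
          (st.1 ++ comp.map (fun m => (m, gk, (comp.length : Int))), seen))
    ([], PySem.Set.empty)
  PySem.List.sorted st.1 pvKey3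

-- ===== PRECONDITION & SPEC =====
def Spec_owner_group_rows (accepted_edges : List (String × String)) (out : List (String × String × Int)) : Prop := out = owner_group_rows_alt accepted_edges
instance (accepted_edges : List (String × String)) (out : List (String × String × Int)) : Decidable (Spec_owner_group_rows accepted_edges out) := by unfold Spec_owner_group_rows; infer_instance

-- ===== CLAIM (what is proved, stated in full; the proofs are below) =====
def Claim_equal_owner_group_rows : Prop := ∀ (accepted_edges : List (String × String)), Dom_owner_group_rows accepted_edges → Spec_owner_group_rows accepted_edges (owner_group_rows accepted_edges)


-- ===== LEMMAS AND PROOFS =====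

-- ---- graph connectivity over the edge list ----
def pvEdgeR (es : List (String × String)) (a b : String) : Prop :=
  (a, b) ∈ es ∨ (b, a) ∈ es

def pvConn (es : List (String × String)) : String → String → Prop :=
  Relation.ReflTransGen (pvEdgeR es)

def pvNodes (es : List (String × String)) : List String :=
  PySem.Set.ofList (es.flatMap (fun e => [e.1, e.2]))

-- ---- parent-forest abstraction ----
def PtrStep (d : PySem.Dict String String) (a b : String) : Prop :=
  d.get? a = some b ∧ b ≠ a

def PtrStar (d : PySem.Dict String String) : String → String → Prop :=
  Relation.ReflTransGen (PtrStep d)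

def RootedAt (d : PySem.Dict String String) (x r : String) : Prop :=
  PtrStar d x r ∧ d.get? r = some r

def WFp (d : PySem.Dict String String) : Prop :=
  ∀ k v, d.get? k = some v → v ∈ d.keys ∧ v ≤ k

def MINp (es : List (String × String)) (d : PySem.Dict String String) : Prop :=
  ∀ x r, RootedAt d x r → pvConn es x r ∧ ∀ y ∈ d.keys, pvConn es x y → r ≤ y

def INVp (es : List (String × String)) (d : PySem.Dict String String) : Prop :=
  d.keys.Nodup ∧ WFp d ∧ d.keys = pvNodes es ∧
  (∀ k v, d.get? k = some v → pvConn es k v) ∧ MINp es d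

lemma edge_symm (es : List (String × String)) : Symmetric (pvEdgeR es) := by
  intro a b h; exact h.elim Or.inr Or.inl

lemma conn_symm (es : List (String × String)) {x y : String} (h : pvConn es x y) : pvConn es y x :=
  Relation.ReflTransGen.symmetric (edge_symm es) h

lemma conn_trans {es : List (String × String)} {x y z : String}
    (h1 : pvConn es x y) (h2 : pvConn es y z) : pvConn es x z :=
  Relation.ReflTransGen.trans h1 h2

lemma mem_pvNodes {es : List (String × String)} {x : String} :
    x ∈ pvNodes es ↔ ∃ e ∈ es, x = e.1 ∨ x = e.2 := by
  unfold pvNodes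
  rw [PySem.Set.mem_ofList, List.mem_flatMap]
  constructor
  · rintro ⟨e, he, hx⟩
    simp only [List.mem_cons, List.mem_singleton, List.not_mem_nil, or_false] at hx
    exact ⟨e, he, hx⟩
  · rintro ⟨e, he, hx⟩
    exact ⟨e, he, by simpa using hx⟩

lemma conn_of_not_node {es : List (String × String)} {x y : String}
    (hx : x ∉ pvNodes es) (h : pvConn es x y) : y = x := by
  induction h using Relation.ReflTransGen.head_induction_on with
  | refl => rfl
  | @head a c hac _ _ =>
    exfalso; apply hx
    rw [mem_pvNodes]
    rcases hac with h1 | h1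
    exacts [⟨_, h1, Or.inl rfl⟩, ⟨_, h1, Or.inr rfl⟩]

lemma conn_mono {es : List (String × String)} (e : String × String) {x y : String}
    (h : pvConn es x y) : pvConn (es ++ [e]) x y := by
  induction h with
  | refl => exact Relation.ReflTransGen.refl
  | tail _ hstep ih =>
    refine ih.tail ?_
    rcases hstep with h1 | h1
    exacts [Or.inl (List.mem_append_left _ h1), Or.inr (List.mem_append_left _ h1)]

lemma conn_append_edge {es : List (String × String)} {l r x y : String} :
    pvConn (es ++ [(l, r)]) x y ↔
      pvConn es x y ∨ (pvConn es x l ∧ pvConn es r y) ∨ (pvConn es x r ∧ pvConn es l y) := by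
  constructor
  · intro h
    induction h with
    | refl => exact Or.inl Relation.ReflTransGen.refl
    | @tail b c _ hstep ih =>
      have estep : pvEdgeR es b c ∨ (b = l ∧ c = r) ∨ (b = r ∧ c = l) := by
        rcases hstep with h1 | h1 <;> rw [List.mem_append] at h1
        · rcases h1 with h1 | h1
          · exact Or.inl (Or.inl h1)
          · simp at h1; exact Or.inr (Or.inl ⟨h1.1, h1.2⟩)
        · rcases h1 with h1 | h1
          · exact Or.inl (Or.inr h1)
          · simp at h1; exact Or.inr (Or.inr ⟨h1.2, h1.1⟩)
      rcases estep with he | ⟨rfl, rfl⟩ | ⟨rfl, rfl⟩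
      · rcases ih with ih | ⟨ih1, ih2⟩ | ⟨ih1, ih2⟩
        · exact Or.inl (ih.tail he)
        · exact Or.inr (Or.inl ⟨ih1, ih2.tail he⟩)
        · exact Or.inr (Or.inr ⟨ih1, ih2.tail he⟩)
      · rcases ih with ih | ⟨ih1, ih2⟩ | ⟨ih1, ih2⟩
        · exact Or.inr (Or.inl ⟨ih, Relation.ReflTransGen.refl⟩)
        · exact Or.inr (Or.inl ⟨ih1, Relation.ReflTransGen.refl⟩)
        · exact Or.inl ih1
      · rcases ih with ih | ⟨ih1, ih2⟩ | ⟨ih1, ih2⟩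
        · exact Or.inr (Or.inr ⟨ih, Relation.ReflTransGen.refl⟩)
        · exact Or.inl ih1
        · exact Or.inr (Or.inr ⟨ih1, Relation.ReflTransGen.refl⟩)
  · have hnew : pvConn (es ++ [(l, r)]) l r :=
      Relation.ReflTransGen.single (Or.inl (List.mem_append_right _ (by simp)))
    rintro (h | ⟨h1, h2⟩ | ⟨h1, h2⟩)
    · exact conn_mono _ h
    · exact conn_trans (conn_mono _ h1) (conn_trans hnew (conn_mono _ h2))
    · exact conn_trans (conn_mono _ h1)
        (conn_trans (conn_symm _ hnew) (conn_mono _ h2))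

lemma conn_append_same {es : List (String × String)} {l r : String} (hlr : pvConn es l r)
    {x y : String} : pvConn (es ++ [(l, r)]) x y ↔ pvConn es x y := by
  rw [conn_append_edge]
  constructor
  · rintro (h | ⟨h1, h2⟩ | ⟨h1, h2⟩)
    · exact h
    · exact conn_trans h1 (conn_trans hlr h2)
    · exact conn_trans h1 (conn_trans (conn_symm _ hlr) h2)
  · exact Or.inl

lemma pvNodes_append (es : List (String × String)) (e : String × String) :
    pvNodes (es ++ [e]) = PySem.Set.add (PySem.Set.add (pvNodes es) e.1) e.2 := by
  unfold pvNodes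
  rw [List.flatMap_append, PySem.Set.ofList_eq_foldl, PySem.Set.ofList_eq_foldl,
    List.foldl_append]
  simp [List.flatMap]

-- ---- basic facts about roots ----
lemma mem_keys_of_get? {d : PySem.Dict String String} {k v : String}
    (h : d.get? k = some v) : k ∈ d.keys := by
  by_contra hk
  rw [← PySem.Dict.get?_eq_none_iff_not_mem_keys] at hk
  simp [hk] at h

lemma get?_isSome_of_mem_keys {d : PySem.Dict String String} {k : String}
    (h : k ∈ d.keys) : ∃ v, d.get? k = some v := by
  rcases ho : d.get? k with _ | v
  · rw [PySem.Dict.get?_eq_none_iff_not_mem_keys] at ho; exact absurd h ho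
  · exact ⟨v, rfl⟩

lemma mem_keys_of_rootedAt {d : PySem.Dict String String} {x r : String}
    (h : RootedAt d x r) : x ∈ d.keys ∧ r ∈ d.keys := by
  refine ⟨?_, mem_keys_of_get? h.2⟩
  rcases (Relation.ReflTransGen.cases_head h.1) with rfl | ⟨b, hstep, _⟩
  · exact mem_keys_of_get? h.2
  · exact mem_keys_of_get? hstep.1

lemma no_step_from_root {d : PySem.Dict String String} {r s : String}
    (hr : d.get? r = some r) (h : PtrStar d r s) : s = r := by
  rcases (Relation.ReflTransGen.cases_head h) with rfl | ⟨b, hstep, _⟩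
  · rfl
  · have h1 := hstep.1
    rw [hr] at h1
    exact absurd (Option.some_injective _ h1.symm) hstep.2

lemma root_unique {d : PySem.Dict String String} {x r1 r2 : String}
    (h1 : RootedAt d x r1) (h2 : RootedAt d x r2) : r1 = r2 := by
  obtain ⟨hstar, hroot⟩ := h1
  revert h2
  induction hstar using Relation.ReflTransGen.head_induction_on with
  | refl => exact fun h2 => (no_step_from_root hroot h2.1).symm
  | @head a b hstep hrest ih =>
    intro h2
    apply ih
    rcases (Relation.ReflTransGen.cases_head h2.1) with rfl | ⟨b', hstep', hrest'⟩
    · have h1 := hstep.1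
      rw [h2.2] at h1
      exact absurd (Option.some_injective _ h1.symm) hstep.2
    · have hb : b' = b := by
        have := hstep'.1.symm.trans hstep.1
        exact Option.some_injective _ this
      exact ⟨hb ▸ hrest', h2.2⟩

lemma ptrStar_le {d : PySem.Dict String String} (hwf : WFp d) {a b : String}
    (h : PtrStar d a b) : b ≤ a := by
  induction h with
  | refl => exact le_refl _
  | tail _ hstep ih => exact le_trans (hwf _ _ hstep.1).2 ih

lemma rootedAt_ext {d d' : PySem.Dict String String}
    (h : ∀ k, d'.get? k = d.get? k) {y s : String} :
    RootedAt d' y s ↔ RootedAt d y s := by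
  have hstar : ∀ a b, PtrStar d' a b ↔ PtrStar d a b := by
    intro a b
    constructor <;> intro hs
    · induction hs with
      | refl => exact Relation.ReflTransGen.refl
      | tail _ hstep ih => exact ih.tail ⟨(h _).symm.trans hstep.1, hstep.2⟩
    · induction hs with
      | refl => exact Relation.ReflTransGen.refl
      | tail _ hstep ih => exact ih.tail ⟨(h _).trans hstep.1, hstep.2⟩
  unfold RootedAt
  rw [hstar, h]

-- repointing x (an arbitrary node) to its own root changes no root assignment
lemma repoint_fwd {d d' : PySem.Dict String String} {x r : String}
    (hd' : ∀ k, d'.get? k = if k = x then some r else d.get? k)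
    (hxr : RootedAt d x r) (hrx : r ≠ x) :
    ∀ y s, RootedAt d' y s → RootedAt d y s := by
  intro y s ⟨hstar, hroot⟩
  have hsx : s ≠ x := by
    intro h; subst h
    rw [hd'] at hroot; simp at hroot; exact hrx hroot
  have hroot' : d.get? s = some s := by
    rw [hd'] at hroot; simp [hsx] at hroot; exact hroot
  clear hroot
  induction hstar using Relation.ReflTransGen.head_induction_on with
  | refl => exact ⟨Relation.ReflTransGen.refl, hroot'⟩
  | @head a b hstep hrest ih =>
    by_cases hax : a = x
    · subst hax
      have hb : b = r := by
        have h1 := hstep.1; rw [hd'] at h1; simp at h1; exact h1.symm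
      subst hb
      have hsr : s = b := no_step_from_root hxr.2 ih.1
      subst hsr
      exact hxr
    · have hstep' : PtrStep d a b := by
        refine ⟨?_, hstep.2⟩
        have h1 := hstep.1; rw [hd'] at h1; simp [hax] at h1; exact h1
      exact ⟨Relation.ReflTransGen.head hstep' ih.1, ih.2⟩

lemma repoint_bwd {d d' : PySem.Dict String String} {x r p : String}
    (hd' : ∀ k, d'.get? k = if k = x then some r else d.get? k)
    (hxr : RootedAt d x r) (hrx : r ≠ x) (hp : d.get? x = some p) (hpne : p ≠ x) :
    ∀ y s, RootedAt d y s → RootedAt d' y s := by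
  intro y s ⟨hstar, hroot⟩
  have hsx : s ≠ x := by
    intro h; subst h
    rw [hroot] at hp; exact hpne (Option.some_injective _ hp).symm
  have hroot' : d'.get? s = some s := by rw [hd']; simp [hsx, hroot]
  refine ⟨?_, hroot'⟩
  induction hstar using Relation.ReflTransGen.head_induction_on with
  | refl => exact Relation.ReflTransGen.refl
  | @head a b hstep hrest ih =>
    by_cases hax : a = x
    · subst hax
      have hb : b = p := Option.some_injective _ (hstep.1.symm.trans hp)
      subst hb
      have hbs : RootedAt d b s := ⟨hrest, hroot⟩
      have hbr : RootedAt d b r := by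
        rcases (Relation.ReflTransGen.cases_head hxr.1) with h' | ⟨b', hstep', hrest'⟩
        · exact absurd h'.symm hrx
        · have hbb : b' = b := Option.some_injective _ (hstep'.1.symm.trans hp)
          exact ⟨hbb ▸ hrest', hxr.2⟩
      have hsr : s = r := root_unique hbs hbr
      subst hsr
      refine Relation.ReflTransGen.single ⟨?_, hsx⟩
      rw [hd']; simp
    · exact Relation.ReflTransGen.head ⟨by rw [hd']; simp [hax, hstep.1], hstep.2⟩ ih

lemma repoint_iff {d : PySem.Dict String String} {x r : String}
    (hx : RootedAt d x r) (y s : String) :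
    RootedAt (d.insert x r) y s ↔ RootedAt d y s := by
  have hget : ∀ k, (d.insert x r).get? k = if k = x then some r else d.get? k := by
    intro k; exact PySem.Dict.get?_insert d x k r
  by_cases hrx : r = x
  · subst hrx
    exact rootedAt_ext (fun k => by rw [hget]; split <;> simp_all [hx.2])
  · obtain ⟨p, hp, hpne⟩ : ∃ p, d.get? x = some p ∧ p ≠ x := by
      rcases (Relation.ReflTransGen.cases_head hx.1) with rfl | ⟨b, hstep, _⟩
      · exact absurd rfl hrx
      · exact ⟨b, hstep.1, hstep.2⟩
    exact ⟨repoint_fwd hget hx hrx y s, repoint_bwd hget hx hrx hp hpne y s⟩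

-- linking root mx to root mn (mx ≠ mn): classes of mx move to mn, others unchanged
lemma link_fwd {d d' : PySem.Dict String String} {mx mn : String}
    (hd' : ∀ k, d'.get? k = if k = mx then some mn else d.get? k)
    (hmx : d.get? mx = some mx) (hmn : d.get? mn = some mn) (hne : mx ≠ mn) :
    ∀ y s, RootedAt d' y s → ((RootedAt d y s ∧ s ≠ mx) ∨ (RootedAt d y mx ∧ s = mn)) := by
  intro y s ⟨hstar, hroot⟩
  have hsmx : s ≠ mx := by
    intro h; subst h
    rw [hd'] at hroot; simp at hroot; exact hne hroot.symm
  have hroot' : d.get? s = some s := by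
    rw [hd'] at hroot; simp [hsmx] at hroot; exact hroot
  clear hroot
  induction hstar using Relation.ReflTransGen.head_induction_on with
  | refl => exact Or.inl ⟨⟨Relation.ReflTransGen.refl, hroot'⟩, hsmx⟩
  | @head a b hstep hrest ih =>
    by_cases hax : a = mx
    · subst hax
      have hb : b = mn := by
        have h1 := hstep.1; rw [hd'] at h1; simp at h1; exact h1.symm
      subst hb
      rcases ih with ⟨hbs, hsmx'⟩ | ⟨hbmx, rfl⟩
      · have hsmn : s = b := no_step_from_root hmn hbs.1
        subst hsmn
        exact Or.inr ⟨⟨Relation.ReflTransGen.refl, hmx⟩, rfl⟩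
      · exact absurd (no_step_from_root hmn hbmx.1) hne
    · have hstep' : PtrStep d a b := by
        refine ⟨?_, hstep.2⟩
        have h1 := hstep.1; rw [hd'] at h1; simp [hax] at h1; exact h1
      rcases ih with ⟨hbs, hsmx'⟩ | ⟨hbmx, rfl⟩
      · exact Or.inl ⟨⟨Relation.ReflTransGen.head hstep' hbs.1, hbs.2⟩, hsmx'⟩
      · exact Or.inr ⟨⟨Relation.ReflTransGen.head hstep' hbmx.1, hbmx.2⟩, rfl⟩

lemma link_bwd {d d' : PySem.Dict String String} {mx mn : String}
    (hd' : ∀ k, d'.get? k = if k = mx then some mn else d.get? k)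
    (hmx : d.get? mx = some mx) (hmn : d.get? mn = some mn) (hne : mx ≠ mn) :
    ∀ y s, ((RootedAt d y s ∧ s ≠ mx) ∨ (RootedAt d y mx ∧ s = mn)) → RootedAt d' y s := by
  have hlift : ∀ y s, PtrStar d y s → PtrStar d' y s := by
    intro y s h
    induction h with
    | refl => exact Relation.ReflTransGen.refl
    | @tail b c _ hstep ih =>
      have hbmx : b ≠ mx := by
        intro hb; subst hb
        have : c = b := Option.some_injective _ (hstep.1.symm.trans hmx)
        exact hstep.2 this
      exact ih.tail ⟨by rw [hd']; simp [hbmx, hstep.1], hstep.2⟩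
  rintro y s (⟨⟨hstar, hroot⟩, hsmx⟩ | ⟨⟨hstar, hroot⟩, rfl⟩)
  · exact ⟨hlift _ _ hstar, by rw [hd']; simp [hsmx, hroot]⟩
  · refine ⟨(hlift _ _ hstar).tail ⟨by rw [hd']; simp, hne.symm⟩, ?_⟩
    rw [hd']; simp [hne.symm, hmn]

lemma link_iff {d : PySem.Dict String String} {mx mn : String}
    (hmx : d.get? mx = some mx) (hmn : d.get? mn = some mn) (hne : mx ≠ mn) (y s : String) :
    RootedAt (d.insert mx mn) y s ↔
      ((RootedAt d y s ∧ s ≠ mx) ∨ (RootedAt d y mx ∧ s = mn)) := by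
  have hget : ∀ k, (d.insert mx mn).get? k = if k = mx then some mn else d.get? k := by
    intro k; exact PySem.Dict.get?_insert d mx k mn
  exact ⟨link_fwd hget hmx hmn hne y s, link_bwd hget hmx hmn hne y s⟩

-- inserting a fresh self-looped key
lemma fresh_fwd {d d' : PySem.Dict String String} {x : String}
    (hd' : ∀ k, d'.get? k = if k = x then some x else d.get? k)
    (hwf : WFp d) (hx : x ∉ d.keys) :
    ∀ y s, RootedAt d' y s → (RootedAt d y s ∨ (y = x ∧ s = x)) := by
  intro y s ⟨hstar, hroot⟩
  induction hstar using Relation.ReflTransGen.head_induction_on with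
  | refl =>
    by_cases hsx : s = x
    · exact Or.inr ⟨hsx, hsx⟩
    · refine Or.inl ⟨Relation.ReflTransGen.refl, ?_⟩
      rw [hd'] at hroot; simp [hsx] at hroot; exact hroot
  | @head a b hstep hrest ih =>
    have hax : a ≠ x := by
      intro h; subst h
      have h1 := hstep.1; rw [hd'] at h1; simp at h1; exact hstep.2 h1.symm
    have hstep' : PtrStep d a b := by
      refine ⟨?_, hstep.2⟩
      have h1 := hstep.1; rw [hd'] at h1; simp [hax] at h1; exact h1
    rcases ih with hb | ⟨rfl, rfl⟩
    · exact Or.inl ⟨Relation.ReflTransGen.head hstep' hb.1, hb.2⟩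
    · exact absurd (hwf _ _ hstep'.1).1 hx

lemma fresh_iff {d : PySem.Dict String String} {x : String} (hwf : WFp d)
    (hx : x ∉ d.keys) (y s : String) :
    RootedAt (d.insert x x) y s ↔ (RootedAt d y s ∨ (y = x ∧ s = x)) := by
  have hget : ∀ k, (d.insert x x).get? k = if k = x then some x else d.get? k := by
    intro k; exact PySem.Dict.get?_insert d x k x
  constructor
  · exact fresh_fwd hget hwf hx y s
  · have hlift : ∀ a b, PtrStar d a b → PtrStar (d.insert x x) a b := by
      intro a b h
      induction h with
      | refl => exact Relation.ReflTransGen.refl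
      | @tail b c _ hstep ih =>
        have hbx : b ≠ x := fun h => hx (h ▸ mem_keys_of_get? hstep.1)
        exact ih.tail ⟨by rw [hget]; simp [hbx, hstep.1], hstep.2⟩
    rintro (⟨hstar, hroot⟩ | ⟨rfl, rfl⟩)
    · have hroot' : (d.insert x x).get? s = some s := by
        rw [hget]
        have : s ≠ x := fun h => hx (h ▸ mem_keys_of_get? hroot)
        simp [this, hroot]
      exact ⟨hlift _ _ hstar, hroot'⟩
    · exact ⟨Relation.ReflTransGen.refl, by rw [hget]; simp⟩

-- ---- strict decrease measure ----
lemma msr_lt {keys : List String} (hnd : keys.Nodup) {p x : String}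
    (hp : p ∈ keys) (hpx : p < x) :
    (keys.filter (fun y => decide (y < p))).length < (keys.filter (fun y => decide (y < x))).length := by
  have hsub : List.Sublist (keys.filter (fun y => decide (y < p))) (keys.filter (fun y => decide (y < x))) :=
    List.monotone_filter_right keys
      (by intro a ha; exact decide_eq_true (lt_trans (of_decide_eq_true ha) hpx))
  rcases Nat.lt_or_ge (keys.filter (fun y => decide (y < p))).length
      (keys.filter (fun y => decide (y < x))).length with h | h
  · exact h
  · exfalso
    have hle := hsub.length_le
    have heq : (keys.filter (fun y => decide (y < p))) = (keys.filter (fun y => decide (y < x))) :=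
      (List.Sublist.length_eq hsub).mp (le_antisymm hle h)
    have hpmem : p ∈ keys.filter (fun y => decide (y < x)) := by
      rw [List.mem_filter]; exact ⟨hp, by simpa using hpx⟩
    rw [← heq, List.mem_filter] at hpmem
    simp at hpmem

lemma msr_lt_len {keys : List String} (hnd : keys.Nodup) {x : String} (hx : x ∈ keys) :
    (keys.filter (fun y => decide (y < x))).length < keys.length := by
  have hsub : List.Sublist (keys.filter (fun y => decide (y < x))) keys := List.filter_sublist
  rcases Nat.lt_or_ge (keys.filter (fun y => decide (y < x))).length keys.length with h | h
  · exact h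
  · exfalso
    have heq : keys.filter (fun y => decide (y < x)) = keys :=
      (List.Sublist.length_eq hsub).mp (le_antisymm hsub.length_le h)
    have : x ∈ keys.filter (fun y => decide (y < x)) := by rw [heq]; exact hx
    rw [List.mem_filter] at this
    simp at this

lemma root_eq_of_conn {es : List (String × String)} {d : PySem.Dict String String}
    (hmin : MINp es d) {x y rx ry : String} (hx : RootedAt d x rx) (hy : RootedAt d y ry)
    (hconn : pvConn es x y) : rx = ry := by
  have hrx := hmin x rx hx
  have hry := hmin y ry hy
  have hrxk := (mem_keys_of_rootedAt hx).2
  have hryk := (mem_keys_of_rootedAt hy).2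
  have h1 : rx ≤ ry := hrx.2 ry hryk (conn_trans hconn hry.1)
  have h2 : ry ≤ rx := hry.2 rx hrxk (conn_trans (conn_symm _ hconn) hrx.1)
  exact le_antisymm h1 h2

lemma set_add_mem {s : List String} {x : String} (hx : x ∈ s) : PySem.Set.add s x = s := by
  simp [PySem.Set.add, PySem.Set.contains, hx]

lemma set_add_not_mem {s : List String} {x : String} (hx : x ∉ s) :
    PySem.Set.add s x = s ++ [x] := by
  simp [PySem.Set.add, PySem.Set.contains, hx]

lemma set_add_len (s : List String) (x : String) :
    (PySem.Set.add s x).length ≤ s.length + 1 := by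
  unfold PySem.Set.add
  split <;> simp

-- ---- findA specification ----
lemma ptrStar_C {d : PySem.Dict String String} {C : String → String → Prop}
    (hCt : ∀ a b c, C a b → C b c → C a c) (hC : ∀ k v, d.get? k = some v → C k v)
    {a b : String} (h : PtrStar d a b) : a = b ∨ C a b := by
  induction h with
  | refl => exact Or.inl rfl
  | @tail m c _ hstep ih =>
    have hmc : C m c := hC _ _ hstep.1
    rcases ih with rfl | ham
    · exact Or.inr hmc
    · exact Or.inr (hCt _ _ _ ham hmc)

lemma findA_spec {fuel : Nat} {d : PySem.Dict String String} {x : String}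
    (hnd : d.keys.Nodup) (hwf : WFp d) (hx : x ∈ d.keys)
    (hfuel : (d.keys.filter (fun y => decide (y < x))).length < fuel) :
    (findA fuel d x).1.keys = d.keys ∧ WFp (findA fuel d x).1 ∧
    RootedAt d x (findA fuel d x).2 ∧
    (∀ y s, RootedAt (findA fuel d x).1 y s ↔ RootedAt d y s) ∧
    (∀ k, x < k → (findA fuel d x).1.get? k = d.get? k) ∧
    (∀ C : String → String → Prop, (∀ a b c, C a b → C b c → C a c) →
      (∀ k v, d.get? k = some v → C k v) →
       ∀ k v, (findA fuel d x).1.get? k = some v → C k v) := by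
  induction fuel generalizing x with
  | zero => omega
  | succ fuel ih =>
    obtain ⟨p, hp⟩ := get?_isSome_of_mem_keys hx
    have hcx : d.contains x = true := by rw [PySem.Dict.contains_iff_mem_keys]; exact hx
    have hsd : d.setdefault x x = d := PySem.Dict.setdefault_of_contains _ _ hcx
    have hgd : d.getD x x = p := by rw [PySem.Dict.getD_eq_get?_getD, hp]; rfl
    by_cases hpx : p = x
    · have hres : findA (fuel + 1) d x = (d, x) := by
        simp only [findA, hsd, hgd]
        rw [if_neg (by simp [hpx])]
        rw [hpx]
      rw [hres]
      subst hpx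
      refine ⟨rfl, hwf, ⟨Relation.ReflTransGen.refl, hp⟩, fun y s => Iff.rfl,
        fun k _ => rfl, fun C _ hC k v hv => hC _ _ hv⟩
    · have hple : p ≤ x := (hwf _ _ hp).2
      have hplt : p < x := lt_of_le_of_ne hple hpx
      have hpk : p ∈ d.keys := (hwf _ _ hp).1
      have hfuel' : (d.keys.filter (fun y => decide (y < p))).length < fuel := by
        have := msr_lt hnd hpk hplt
        omega
      obtain ⟨hkeys, hwf1, hrootp, hiff, hunch, hCpres⟩ := ih hpk hfuel'
      set pr := findA fuel d p with hpr
      have hres : findA (fuel + 1) d x = (pr.1.insert x pr.2, pr.2) := by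
        simp only [findA, hsd, hgd]
        rw [if_pos hpx]
      rw [hres]
      have hrk : pr.2 ∈ d.keys := (mem_keys_of_rootedAt hrootp).2
      have hrle : pr.2 ≤ p := ptrStar_le hwf hrootp.1
      have hrootx : RootedAt d x pr.2 := ⟨Relation.ReflTransGen.head ⟨hp, hpx⟩ hrootp.1, hrootp.2⟩
      have hxk1 : x ∈ pr.1.keys := hkeys ▸ hx
      have hkeys2 : (pr.1.insert x pr.2).keys = d.keys := by
        rw [PySem.Dict.keys_insert_of_contains _ _
          (by rw [PySem.Dict.contains_iff_mem_keys]; exact hxk1)]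
        exact hkeys
      have hrootx1 : RootedAt pr.1 x pr.2 := (hiff _ _).mpr hrootx
      have hget2 : ∀ k, (pr.1.insert x pr.2).get? k = if k = x then some pr.2 else pr.1.get? k :=
        fun k => PySem.Dict.get?_insert pr.1 x k pr.2
      refine ⟨hkeys2, ?_, hrootx, ?_, ?_, ?_⟩
      · intro k v hv
        rw [hget2] at hv
        split at hv
        · rename_i hkx
          subst hkx
          rw [hkeys2]
          cases hv
          exact ⟨hrk, le_trans hrle hple⟩
        · have := hwf1 _ _ hv
          rw [hkeys2, ← hkeys]
          exact this
      · intro y s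
        rw [repoint_iff hrootx1 y s, hiff]
      · intro k hk
        rw [hget2, if_neg (by intro h; subst h; exact absurd hk (lt_irrefl _)), hunch k (lt_trans hplt hk)]
      · intro C hCt hC k v hv
        rw [hget2] at hv
        split at hv
        · rename_i hkx
          subst hkx
          cases hv
          have hCxp : C k p := hC _ _ hp
          rcases ptrStar_C hCt hC hrootp.1 with heq | hCpr
          · exact heq ▸ hCxp
          · exact hCt _ _ _ hCxp hCpr
        · exact hCpres C hCt hC _ _ hv

lemma findA_fresh {fuel : Nat} {d : PySem.Dict String String} {x : String}
    (hx : x ∉ d.keys) (hfuel : 1 ≤ fuel) :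
    findA fuel d x = (d.insert x x, x) := by
  match fuel, hfuel with
  | fuel + 1, _ =>
    have hsd : d.setdefault x x = d.insert x x :=
      PySem.Dict.setdefault_of_not_contains _ _ (by
        rw [PySem.Dict.contains_eq_decide_mem_keys]; simp [hx])
    have hgd : (d.insert x x).getD x x = x := PySem.Dict.getD_insert_self d x x x
    simp only [findA, hsd, hgd]
    rw [if_neg (by simp)]

-- ---- union invariant step ----
lemma find_step {es : List (String × String)} {d : PySem.Dict String String} {x : String}
    {fuel : Nat} (hnd : d.keys.Nodup) (hwf : WFp d)
    (hpc : ∀ k v, d.get? k = some v → pvConn es k v) (hmin : MINp es d)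
    (hnodes : ∀ y, y ∈ pvNodes es → y ∈ d.keys)
    (hfuel : d.keys.length + 1 ≤ fuel) :
    (findA fuel d x).1.keys = PySem.Set.add d.keys x ∧ (findA fuel d x).1.keys.Nodup ∧
    WFp (findA fuel d x).1 ∧
    (∀ k v, (findA fuel d x).1.get? k = some v → pvConn es k v) ∧
    MINp es (findA fuel d x).1 ∧
    RootedAt (findA fuel d x).1 x (findA fuel d x).2 ∧
    (∀ y s, RootedAt d y s → RootedAt (findA fuel d x).1 y s) ∧
    (∀ y, y ∈ pvNodes es → y ∈ (findA fuel d x).1.keys) ∧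
    (findA fuel d x).1.keys.length ≤ d.keys.length + 1 := by
  by_cases hx : x ∈ d.keys
  · have hfuel' : (d.keys.filter (fun y => decide (y < x))).length < fuel := by
      have := msr_lt_len hnd hx
      omega
    obtain ⟨hkeys, hwf1, hrootx, hiff, _, hCpres⟩ := findA_spec hnd hwf hx hfuel'
    rw [set_add_mem hx]
    refine ⟨hkeys, hkeys ▸ hnd, hwf1, ?_, ?_, (hiff _ _).mpr hrootx, ?_, ?_, ?_⟩
    · exact hCpres _ (fun a b c => conn_trans) hpc
    · intro y s hys
      rw [hiff] at hys
      obtain ⟨h1, h2⟩ := hmin y s hys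
      exact ⟨h1, fun z hz => h2 z (hkeys ▸ hz)⟩
    · intro y s h
      exact (hiff _ _).mpr h
    · intro y hy
      rw [hkeys]
      exact hnodes y hy
    · rw [hkeys]; omega
  · rw [findA_fresh hx (by omega)]
    have hxnode : x ∉ pvNodes es := fun h => hx (hnodes x h)
    have hkeys : (d.insert x x).keys = d.keys ++ [x] :=
      PySem.Dict.keys_insert_of_not_contains _ _ (by
        rw [PySem.Dict.contains_eq_decide_mem_keys]; simp [hx])
    have hget : ∀ k, (d.insert x x).get? k = if k = x then some x else d.get? k :=
      fun k => PySem.Dict.get?_insert d x k x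
    have hiff := fresh_iff hwf hx
    refine ⟨?_, ?_, ?_, ?_, ?_, ?_, ?_, ?_, ?_⟩
    · rw [hkeys, set_add_not_mem hx]
    · rw [hkeys]
      exact List.Nodup.append hnd (List.nodup_singleton x)
        (fun a ha hax => hx ((List.mem_singleton.mp hax) ▸ ha))
    · intro k v hv
      rw [hget] at hv
      split at hv
      · rename_i hkx
        cases hv
        subst hkx
        rw [hkeys]
        simp
      · obtain ⟨h1, h2⟩ := hwf _ _ hv
        rw [hkeys]
        exact ⟨List.mem_append_left _ h1, h2⟩
    · intro k v hv
      rw [hget] at hv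
      split at hv
      · rename_i hkx
        cases hv
        subst hkx
        exact Relation.ReflTransGen.refl
      · exact hpc _ _ hv
    · intro y s hys
      rw [hiff] at hys
      rcases hys with hys | ⟨rfl, rfl⟩
      · obtain ⟨h1, h2⟩ := hmin y s hys
        refine ⟨h1, fun z hz hc => ?_⟩
        rw [hkeys, List.mem_append] at hz
        rcases hz with hz | hz
        · exact h2 z hz hc
        · simp at hz
          subst hz
          have := conn_of_not_node hxnode (conn_symm _ hc)
          subst this
          exact absurd (mem_keys_of_rootedAt hys).1 hx
      · refine ⟨Relation.ReflTransGen.refl, fun z hz hc => ?_⟩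
        have := conn_of_not_node hxnode hc
        subst this
        exact le_refl _
    · exact (hiff _ _).mpr (Or.inr ⟨rfl, rfl⟩)
    · intro y s h
      exact (hiff _ _).mpr (Or.inl h)
    · intro y hy
      rw [hkeys]
      exact List.mem_append_left _ (hnodes y hy)
    · rw [hkeys]
      simp

lemma union_spec {es : List (String × String)} {d : PySem.Dict String String}
    {l r : String} {fuel : Nat} (hinv : INVp es d) (hfuel : d.keys.length + 2 ≤ fuel) :
    INVp (es ++ [(l, r)]) (unionA fuel d l r) := by
  obtain ⟨hnd, hwf, hkeys, hpc, hmin⟩ := hinv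
  have hnodes : ∀ y, y ∈ pvNodes es → y ∈ d.keys := fun y hy => hkeys ▸ hy
  obtain ⟨k1, n1, w1, c1, m1, rt1, pres1, nod1, len1⟩ :=
    find_step (x := l) (fuel := fuel) hnd hwf hpc hmin hnodes (by omega)
  set d1 := (findA fuel d l).1 with hd1
  set lr := (findA fuel d l).2 with hlr
  obtain ⟨k2, n2, w2, c2, m2, rt2, pres2, nod2, len2⟩ :=
    find_step (x := r) (fuel := fuel) n1 w1 c1 m1 nod1 (by omega)
  set d2 := (findA fuel d1 r).1 with hd2
  set rr := (findA fuel d1 r).2 with hrr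
  have rt1' : RootedAt d2 l lr := pres2 _ _ rt1
  have hkeys2 : d2.keys = pvNodes (es ++ [(l, r)]) := by
    rw [k2, k1, hkeys, pvNodes_append]
  have hconn_l : pvConn es l lr := (m2 l lr rt1').1
  have hconn_r : pvConn es r rr := (m2 r rr rt2).1
  have hres : unionA fuel d l r =
      if lr = rr then d2 else d2.insert (max lr rr) (min lr rr) := by
    simp only [unionA, ← hd1, ← hlr, ← hd2, ← hrr]
  rw [hres]
  by_cases heq : lr = rr
  · rw [if_pos heq]
    have hlrconn : pvConn es l r := conn_trans hconn_l (heq ▸ conn_symm _ hconn_r)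
    refine ⟨hkeys2 ▸ n2, w2, hkeys2, ?_, ?_⟩
    · intro k v hv
      exact conn_mono _ (c2 _ _ hv)
    · intro x s hxs
      obtain ⟨h1, h2⟩ := m2 x s hxs
      refine ⟨conn_mono _ h1, fun y hy hc => ?_⟩
      rw [conn_append_same hlrconn] at hc
      exact h2 y hy hc
  · rw [if_neg heq]
    have hlrroot : d2.get? lr = some lr := rt1'.2
    have hrrroot : d2.get? rr = some rr := rt2.2
    have hlrk : lr ∈ d2.keys := (mem_keys_of_rootedAt rt1').2
    have hrrk : rr ∈ d2.keys := (mem_keys_of_rootedAt rt2).2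
    set mx := max lr rr with hmx
    set mn := min lr rr with hmn
    have hcases : (mx = rr ∧ mn = lr) ∨ (mx = lr ∧ mn = rr) := by
      rcases le_total lr rr with h | h
      · exact Or.inl ⟨max_eq_right h, min_eq_left h⟩
      · exact Or.inr ⟨max_eq_left h, min_eq_right h⟩
    have hmxor : mx = lr ∨ mx = rr := by
      rcases hcases with ⟨h1, _⟩ | ⟨h1, _⟩
      exacts [Or.inr h1, Or.inl h1]
    have hmnor : mn = lr ∨ mn = rr := by
      rcases hcases with ⟨_, h2⟩ | ⟨_, h2⟩
      exacts [Or.inl h2, Or.inr h2]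
    have hmnmx : mn ≠ mx := by
      rcases hcases with ⟨h1, h2⟩ | ⟨h1, h2⟩
      · rw [h1, h2]; exact heq
      · rw [h1, h2]; exact Ne.symm heq
    have hmxroot : d2.get? mx = some mx := by rcases hmxor with h | h <;> rw [h] <;> assumption
    have hmnroot : d2.get? mn = some mn := by rcases hmnor with h | h <;> rw [h] <;> assumption
    have hmxk : mx ∈ d2.keys := by rcases hmxor with h | h <;> rw [h] <;> assumption
    have hmnk : mn ∈ d2.keys := by rcases hmnor with h | h <;> rw [h] <;> assumption
    have hliff := link_iff hmxroot hmnroot (Ne.symm hmnmx)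
    have hget3 : ∀ k, (d2.insert mx mn).get? k = if k = mx then some mn else d2.get? k :=
      fun k => PySem.Dict.get?_insert d2 mx k mn
    have hkeys3 : (d2.insert mx mn).keys = d2.keys :=
      PySem.Dict.keys_insert_of_contains _ _
        (by rw [PySem.Dict.contains_iff_mem_keys]; exact hmxk)
    -- connectivity with the new edge
    have hconn'_lr_rr : pvConn (es ++ [(l, r)]) lr rr := by
      have hnew : pvConn (es ++ [(l, r)]) l r :=
        Relation.ReflTransGen.single (Or.inl (List.mem_append_right _ (by simp)))
      exact conn_trans (conn_symm _ (conn_mono _ hconn_l))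
        (conn_trans hnew (conn_mono _ hconn_r))
    have hconn'_mx_mn : pvConn (es ++ [(l, r)]) mx mn := by
      rcases hmxor with h1 | h1 <;> rcases hmnor with h2 | h2 <;> rw [h1, h2]
      · exact Relation.ReflTransGen.refl
      · exact hconn'_lr_rr
      · exact conn_symm _ hconn'_lr_rr
      · exact Relation.ReflTransGen.refl
    have hmnle : mn ≤ mx := min_le_max
    refine ⟨hkeys3 ▸ hkeys2 ▸ n2, ?_, hkeys3 ▸ hkeys2, ?_, ?_⟩
    · -- WFp
      intro k v hv
      rw [hget3] at hv
      split at hv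
      · rename_i hkmx
        cases hv
        subst hkmx
        rw [hkeys3]
        exact ⟨hmnk, hmnle⟩
      · obtain ⟨h1, h2⟩ := w2 _ _ hv
        rw [hkeys3]
        exact ⟨h1, h2⟩
    · -- pointers are connections
      intro k v hv
      rw [hget3] at hv
      split at hv
      · rename_i hkmx
        cases hv
        subst hkmx
        exact hconn'_mx_mn
      · exact conn_mono _ (c2 _ _ hv)
    · -- MINp for the merged classes
      intro x s hxs
      rw [hliff] at hxs
      have hminl := m2 l lr rt1'
      have hminr := m2 r rr rt2
      rcases hxs with ⟨hxs, hsmx⟩ | ⟨hxmx, rfl⟩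
      · obtain ⟨h1, h2⟩ := m2 x s hxs
        refine ⟨conn_mono _ h1, fun y hy hc => ?_⟩
        rw [hkeys3] at hy
        rw [conn_append_edge] at hc
        rcases hc with hc | ⟨hcl, hcr⟩ | ⟨hcr, hcl⟩
        · exact h2 y hy hc
        · -- x ~ l, so s = lr; s ≠ mx forces mx = rr, mn = lr = s
          have hslr : s = lr := root_eq_of_conn m2 hxs rt1' hcl
          have hmxrr : mx = rr := by
            rcases hmxor with h | h
            · exact absurd (hslr.trans h.symm) hsmx
            · exact h
          have : rr ≤ y := hminr.2 y hy hcr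
          have hmnlr : mn = lr := by
            rcases hcases with ⟨_, h2⟩ | ⟨h1, _⟩
            · exact h2
            · exact absurd (h1.symm.trans hmxrr) heq
          calc s = lr := hslr
            _ = mn := hmnlr.symm
            _ ≤ mx := hmnle
            _ = rr := hmxrr
            _ ≤ y := this
        · -- x ~ r, so s = rr; s ≠ mx forces mx = lr
          have hsrr : s = rr := root_eq_of_conn m2 hxs rt2 hcr
          have hmxlr : mx = lr := by
            rcases hmxor with h | h
            · exact h
            · exact absurd (hsrr.trans h.symm) hsmx
          have : lr ≤ y := hminl.2 y hy hcl
          have hmnrr : mn = rr := by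
            rcases hcases with ⟨h1, _⟩ | ⟨_, h2⟩
            · exact absurd (hmxlr.symm.trans h1) heq
            · exact h2
          calc s = rr := hsrr
            _ = mn := hmnrr.symm
            _ ≤ mx := hmnle
            _ = lr := hmxlr
            _ ≤ y := this
      · obtain ⟨h1, h2⟩ := m2 x mx hxmx
        refine ⟨conn_trans (conn_mono _ h1) hconn'_mx_mn, fun y hy hc => ?_⟩
        rw [hkeys3] at hy
        rw [conn_append_edge] at hc
        rcases hc with hc | ⟨hcl, hcr⟩ | ⟨hcr, hcl⟩
        · exact le_trans hmnle (h2 y hy hc)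
        · have hmxlr : mx = lr := root_eq_of_conn m2 hxmx rt1' hcl
          have : rr ≤ y := hminr.2 y hy hcr
          have hmnrr : mn = rr := by
            rcases hcases with ⟨h1, _⟩ | ⟨_, h2⟩
            · exact absurd (hmxlr.symm.trans h1) heq
            · exact h2
          rw [hmnrr]; exact this
        · have hmxrr : mx = rr := root_eq_of_conn m2 hxmx rt2 hcr
          have : lr ≤ y := hminl.2 y hy hcl
          have hmnlr : mn = lr := by
            rcases hcases with ⟨_, h2⟩ | ⟨h1, _⟩
            · exact h2
            · exact absurd (h1.symm.trans hmxrr) heq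
          rw [hmnlr]; exact this

lemma fold_union {esP es_rem : List (String × String)} {d : PySem.Dict String String}
    {F : Nat} (hinv : INVp esP d) (hF : d.keys.length + 2 * es_rem.length + 2 ≤ F) :
    INVp (esP ++ es_rem) (es_rem.foldl (fun parent e => unionA F parent e.1 e.2) d) := by
  induction es_rem generalizing esP d with
  | nil => simpa using hinv
  | cons e t ih =>
    simp only [List.foldl_cons]
    have hstep : INVp (esP ++ [e]) (unionA F d e.1 e.2) := by
      have := union_spec (l := e.1) (r := e.2) (fuel := F) hinv (by omega)
      simpa using this
    have hlen : (unionA F d e.1 e.2).keys.length ≤ d.keys.length + 2 := by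
      have hk := hstep.2.2.1
      rw [hk, pvNodes_append]
      have hold : pvNodes esP = d.keys := (hinv.2.2.1).symm
      have h1 := set_add_len (PySem.Set.add (pvNodes esP) e.1) e.2
      have h2 := set_add_len (pvNodes esP) e.1
      rw [hold] at h1 h2 ⊢
      omega
    have := ih hstep (by have := hlen; simp at hF ⊢; omega)
    rw [List.append_assoc] at this
    simpa using this

lemma parentF_inv (es : List (String × String)) :
    INVp es (es.foldl (fun parent e => unionA (es.length * 2 + 2) parent e.1 e.2) PySem.Dict.empty) := by
  have hempty : INVp [] (PySem.Dict.empty : PySem.Dict String String) := by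
    refine ⟨by simp [PySem.Dict.keys_empty], ?_, by simp [PySem.Dict.keys_empty, pvNodes], ?_, ?_⟩
    · intro k v hv
      rw [PySem.Dict.get?_empty] at hv
      cases hv
    · intro k v hv
      rw [PySem.Dict.get?_empty] at hv
      cases hv
    · intro x s hxs
      obtain ⟨_, hroot⟩ := hxs
      rw [PySem.Dict.get?_empty] at hroot
      cases hroot
  have := fold_union (esP := []) (es_rem := es) (F := es.length * 2 + 2) hempty
    (by simp [PySem.Dict.keys_empty]; omega)
  simpa using this

-- ---- phase 2: A's grouping pass ----
def pvParentF (es : List (String × String)) : PySem.Dict String String :=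
  es.foldl (fun parent e => unionA (es.length * 2 + 2) parent e.1 e.2) PySem.Dict.empty

def pvKs (es : List (String × String)) : List String := (pvParentF es).keys

def pvRoot (es : List (String × String)) (x : String) : String :=
  (findA (es.length * 2 + 2) (pvParentF es) x).2

def pvCls (es : List (String × String)) (c : String) : List String :=
  (pvKs es).filter (fun k => pvRoot es k == c)

def pvG (ms : List String) : List (String × String × Int) :=
  if ms.length < 2 then []
  else ms.map (fun m => (m, (PySem.List.min? ms (fun y => y)).getD "", (ms.length : Int)))

lemma pvInvF (es : List (String × String)) : INVp es (pvParentF es) := parentF_inv es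

lemma pvKs_eq (es : List (String × String)) : pvKs es = pvNodes es := (pvInvF es).2.2.1

lemma set_ofList_len_le (l : List String) : (PySem.Set.ofList l).length ≤ l.length := by
  rw [PySem.Set.ofList_eq_foldl]
  induction l using List.reverseRecOn with
  | nil => simp
  | append_singleton t x ih =>
    rw [List.foldl_append]
    simp only [List.foldl_cons, List.foldl_nil]
    have := set_add_len (t.foldl PySem.Set.add []) x
    simp only [List.length_append, List.length_singleton]
    omega

lemma flatMap_pair_len (es : List (String × String)) :
    (es.flatMap (fun e => [e.1, e.2])).length = 2 * es.length := by
  induction es with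
  | nil => simp
  | cons e t ih =>
    simp only [List.flatMap_cons, List.length_append, List.length_cons, ih, List.length_nil]
    omega

lemma pvKs_len (es : List (String × String)) : (pvKs es).length ≤ 2 * es.length := by
  rw [pvKs_eq]
  unfold pvNodes
  have h1 := set_ofList_len_le (es.flatMap (fun e => [e.1, e.2]))
  have h2 := flatMap_pair_len es
  omega

lemma pvRoot_spec {es : List (String × String)} {x : String} (hx : x ∈ pvKs es) :
    RootedAt (pvParentF es) x (pvRoot es x) := by
  obtain ⟨hnd, hwf, _, _, _⟩ := pvInvF es
  have hfuel : ((pvParentF es).keys.filter (fun y => decide (y < x))).length < es.length * 2 + 2 := by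
    have := msr_lt_len hnd hx
    have := pvKs_len es
    unfold pvKs at *
    omega
  exact (findA_spec hnd hwf hx hfuel).2.2.1

-- the grouping fold over the keys is equivalent to a pure fold keyed by pvRoot
lemma phase2_comps (es : List (String × String)) :
    ∀ (ks1 : List String) (dst : PySem.Dict String String)
      (comps : PySem.Dict String (List String)),
      dst.keys = pvKs es → dst.keys.Nodup → WFp dst →
      (∀ y s, RootedAt dst y s ↔ RootedAt (pvParentF es) y s) →
      (∀ k ∈ ks1, k ∈ pvKs es) →
      (ks1.foldl
        (fun (st : PySem.Dict String String × PySem.Dict String (List String)) k =>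
          ((findA (es.length * 2 + 2) st.1 k).1,
            st.2.modify (findA (es.length * 2 + 2) st.1 k).2 [] (fun ms => ms ++ [k])))
        (dst, comps)).2
        = ks1.foldl (fun c k => c.modify (pvRoot es k) [] (fun ms => ms ++ [k])) comps := by
  intro ks1
  induction ks1 with
  | nil => intro dst comps _ _ _ _ _; rfl
  | cons k t ih =>
    intro dst comps hkeys hnd hwf hiff hmem
    have hk : k ∈ dst.keys := by rw [hkeys]; exact hmem k (by simp)
    have hfuel : (dst.keys.filter (fun y => decide (y < k))).length < es.length * 2 + 2 := by
      have h1 := msr_lt_len hnd hk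
      have h2 := pvKs_len es
      rw [hkeys] at h1 ⊢
      omega
    obtain ⟨hkeys1, hwf1, hroot1, hiff1, _, _⟩ := findA_spec hnd hwf hk hfuel
    have hrooteq : (findA (es.length * 2 + 2) dst k).2 = pvRoot es k := by
      have h1 : RootedAt (pvParentF es) k (findA (es.length * 2 + 2) dst k).2 :=
        (hiff _ _).mp hroot1
      exact root_unique h1 (pvRoot_spec (hmem k (by simp)))
    simp only [List.foldl_cons]
    rw [hrooteq]
    exact ih _ _ (hkeys1.trans hkeys) (hkeys1 ▸ hnd) hwf1
      (fun y s => (hiff1 y s).trans (hiff y s)) (fun x hx => hmem x (List.mem_cons_of_mem _ hx))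

def pvRowsA (es : List (String × String)) : List (String × String × Int) :=
  (PySem.Set.ofList ((pvKs es).map (pvRoot es))).flatMap (fun c => pvG (pvCls es c))

lemma pvCompsC_keys (es : List (String × String)) :
    ((pvKs es).foldl (fun c k => c.modify (pvRoot es k) [] (fun ms => ms ++ [k]))
      (PySem.Dict.empty : PySem.Dict String (List String))).keys
    = PySem.Set.ofList ((pvKs es).map (pvRoot es)) := by
  rw [PySem.Dict.keys_foldl_modify_key (pvKs es) (pvRoot es) []
    (fun _ k => fun ms => ms ++ [k]) PySem.Dict.empty]
  rw [PySem.Dict.keys_empty]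
  rw [PySem.Set.ofList_eq_foldl]
  rfl

lemma pvCompsC_nodup (es : List (String × String)) :
    ((pvKs es).foldl (fun c k => c.modify (pvRoot es k) [] (fun ms => ms ++ [k]))
      (PySem.Dict.empty : PySem.Dict String (List String))).keys.Nodup := by
  apply PySem.Dict.nodup_keys_foldl_modify_key (pvKs es) (pvRoot es) []
    (fun _ k => fun ms => ms ++ [k]) PySem.Dict.empty
  rw [PySem.Dict.keys_empty]
  exact List.nodup_nil

lemma pvCompsC_getD (es : List (String × String)) (c : String) :
    ((pvKs es).foldl (fun c k => c.modify (pvRoot es k) [] (fun ms => ms ++ [k]))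
      (PySem.Dict.empty : PySem.Dict String (List String))).getD c []
    = pvCls es c := by
  have hfold : (pvKs es).foldl (fun c k => c.modify (pvRoot es k) [] (fun ms => ms ++ [k]))
      (PySem.Dict.empty : PySem.Dict String (List String))
      = ((pvKs es).map (fun k => (pvRoot es k, k))).foldl
          (fun d p => d.modify p.1 [] (fun ms => ms ++ [p.2])) PySem.Dict.empty := by
    rw [List.foldl_map]
  rw [hfold, PySem.Dict.getD_foldl_modify_append]
  rw [PySem.Dict.getD_empty]
  rw [List.filter_map, List.map_map]
  unfold pvCls
  simp [Function.comp_def]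

lemma rowsA_eq (es : List (String × String)) :
    owner_group_rows es = PySem.List.sorted (pvRowsA es) pvKey3 := by
  obtain ⟨hnd, hwf, _, _, _⟩ := pvInvF es
  have hcomps := phase2_comps es (pvKs es) (pvParentF es) PySem.Dict.empty rfl hnd hwf
    (fun _ _ => Iff.rfl) (fun k hk => hk)
  simp only [owner_group_rows]
  rw [show (es.foldl (fun parent e => unionA (es.length * 2 + 2) parent e.1 e.2)
      PySem.Dict.empty) = pvParentF es from rfl]
  rw [show (pvParentF es).keys = pvKs es from rfl]
  rw [hcomps]
  congr 1
  rw [PySem.Dict.values_eq_map_keys _ (pvCompsC_nodup es) []]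
  have hbody : (fun (rows : List (String × String × Int)) (ms : List String) =>
      if ms.length < 2 then rows
      else rows ++ ms.map (fun m => (m, (PySem.List.min? ms (fun m => m)).getD "", (ms.length : Int))))
      = (fun rows ms => rows ++ pvG ms) := by
    funext rows ms
    unfold pvG
    split
    · simp
    · rfl
  rw [hbody, PySem.List.foldl_append_eq_flatMap]
  rw [List.nil_append, List.flatMap_map]
  rw [pvCompsC_keys]
  unfold pvRowsA
  apply List.flatMap_congr  -- may not exist; fallback below
  intro c hc
  rw [pvCompsC_getD]

-- ---- class facts shared by both sides ----
lemma nodup_length_le {l k : List String} (h : l.Nodup) (hs : ∀ y ∈ l, y ∈ k) :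
    l.length ≤ k.length := by
  calc l.length = l.toFinset.card := (List.toFinset_card_of_nodup h).symm
    _ ≤ k.toFinset.card := Finset.card_le_card (by intro a ha; simp at ha ⊢; exact hs a ha)
    _ ≤ k.length := List.toFinset_card_le k

lemma pvKs_nodup (es : List (String × String)) : (pvKs es).Nodup := (pvInvF es).1

lemma mem_pvCls {es : List (String × String)} {c m : String} :
    m ∈ pvCls es c ↔ m ∈ pvKs es ∧ pvRoot es m = c := by
  unfold pvCls
  rw [List.mem_filter]
  simp

lemma self_mem_pvCls {es : List (String × String)} {m : String} (hm : m ∈ pvKs es) :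
    m ∈ pvCls es (pvRoot es m) := mem_pvCls.mpr ⟨hm, rfl⟩

lemma pvCls_nodup (es : List (String × String)) (c : String) : (pvCls es c).Nodup :=
  (pvKs_nodup es).filter _

lemma root_eq_iff_conn {es : List (String × String)} {x y : String}
    (hx : x ∈ pvKs es) (hy : y ∈ pvKs es) :
    pvRoot es x = pvRoot es y ↔ pvConn es x y := by
  have hm : MINp es (pvParentF es) := (pvInvF es).2.2.2.2
  constructor
  · intro h
    have h1 := (hm x _ (pvRoot_spec hx)).1
    have h2 := (hm y _ (pvRoot_spec hy)).1
    exact conn_trans h1 (h ▸ conn_symm _ h2)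
  · intro h
    exact root_eq_of_conn hm (pvRoot_spec hx) (pvRoot_spec hy) h

lemma min?_id_unique {xs ys : List String} (h : ∀ a, a ∈ xs ↔ a ∈ ys) {m1 m2 : String}
    (h1 : PySem.List.min? xs (fun y => y) = some m1)
    (h2 : PySem.List.min? ys (fun y => y) = some m2) : m1 = m2 := by
  have ha := PySem.List.min?_isMin h1 m2 ((h m2).mpr (PySem.List.min?_mem h2))
  have hb := PySem.List.min?_isMin h2 m1 ((h m1).mp (PySem.List.min?_mem h1))
  exact le_antisymm ha hb

lemma length_eq_of_mem_iff {xs ys : List String} (hx : xs.Nodup) (hy : ys.Nodup)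
    (h : ∀ a, a ∈ xs ↔ a ∈ ys) : xs.length = ys.length :=
  ((List.perm_ext_iff_of_nodup hx hy).mpr h).length_eq

-- ---- membership characterisation of A's row list ----
def pvRowOK (es : List (String × String)) (t : String × String × Int) : Prop :=
  t.1 ∈ pvKs es ∧ 2 ≤ (pvCls es (pvRoot es t.1)).length ∧
  t.2.1 = (PySem.List.min? (pvCls es (pvRoot es t.1)) (fun y => y)).getD "" ∧
  t.2.2 = ((pvCls es (pvRoot es t.1)).length : Int)

lemma mem_pvG {ms : List String} {t : String × String × Int} :
    t ∈ pvG ms ↔ 2 ≤ ms.length ∧ t.1 ∈ ms ∧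
      t.2.1 = (PySem.List.min? ms (fun y => y)).getD "" ∧ t.2.2 = (ms.length : Int) := by
  unfold pvG
  split
  · rename_i hlt
    simp only [List.not_mem_nil, false_iff]
    intro hc
    omega
  · rename_i hlt
    rw [List.mem_map]
    constructor
    · rintro ⟨m, hm, rfl⟩
      exact ⟨by omega, hm, rfl, rfl⟩
    · rintro ⟨_, hm, h1, h2⟩
      refine ⟨t.1, hm, ?_⟩
      obtain ⟨a, b, c⟩ := t
      simp at h1 h2 ⊢
      exact ⟨h1.symm, h2.symm⟩

lemma mem_pvRowsA {es : List (String × String)} {t : String × String × Int} :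
    t ∈ pvRowsA es ↔ pvRowOK es t := by
  unfold pvRowsA
  rw [List.mem_flatMap]
  constructor
  · rintro ⟨c, hc, ht⟩
    rw [mem_pvG] at ht
    obtain ⟨hlen, hmem, h1, h2⟩ := ht
    obtain ⟨hks, hroot⟩ := mem_pvCls.mp hmem
    subst hroot
    exact ⟨hks, hlen, h1, h2⟩
  · rintro ⟨hks, hlen, h1, h2⟩
    refine ⟨pvRoot es t.1, ?_, ?_⟩
    · rw [PySem.Set.mem_ofList, List.mem_map]
      exact ⟨t.1, hks, rfl⟩
    · rw [mem_pvG]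
      exact ⟨hlen, self_mem_pvCls hks, h1, h2⟩

lemma nodup_flatMap_cls {R : List String} (hR : R.Nodup)
    {es : List (String × String)} :
    ((R.flatMap (fun c => pvG (pvCls es c)))).Nodup := by
  induction R with
  | nil => exact List.nodup_nil
  | cons c t ih =>
    rw [List.flatMap_cons, List.nodup_append]
    obtain ⟨hc, ht⟩ := List.nodup_cons.mp hR
    refine ⟨?_, ih ht, ?_⟩
    · -- pvG of a class is nodup: map of an injective function over a nodup list
      unfold pvG
      split
      · exact List.nodup_nil
      · exact ((pvCls_nodup es c).map (fun a b h => congrArg Prod.fst h))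
    · intro t1 h1 t2 hm2
      rw [List.mem_flatMap] at hm2
      obtain ⟨c2, hc2, h2⟩ := hm2
      intro heq
      subst heq
      rw [mem_pvG] at h1 h2
      have e1 : pvRoot es t1.1 = c := (mem_pvCls.mp h1.2.1).2
      have e2 : pvRoot es t1.1 = c2 := (mem_pvCls.mp h2.2.1).2
      exact hc ((e1.symm.trans e2) ▸ hc2)

lemma pvRowsA_nodup (es : List (String × String)) : (pvRowsA es).Nodup :=
  nodup_flatMap_cls (PySem.Set.nodup_ofList _) 

-- ---- B side: the adjacency dict ----
def pvPairs (es : List (String × String)) : List (String × String) :=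
  es.flatMap (fun e => [(e.1, e.2), (e.2, e.1)])

def pvAdj (es : List (String × String)) : PySem.Dict String (List String) :=
  es.foldl
    (fun (adj : PySem.Dict String (List String)) e =>
      (adj.modify e.1 [] (fun ns => ns ++ [e.2])).modify e.2 [] (fun ns => ns ++ [e.1]))
    PySem.Dict.empty

lemma pvAdj_eq_pairs (es : List (String × String)) :
    pvAdj es = (pvPairs es).foldl
      (fun d p => d.modify p.1 [] (fun ns => ns ++ [p.2])) PySem.Dict.empty := by
  unfold pvAdj pvPairs
  generalize (PySem.Dict.empty : PySem.Dict String (List String)) = d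
  induction es generalizing d with
  | nil => rfl
  | cons e t ih =>
    rw [List.foldl_cons, List.flatMap_cons, List.foldl_append]
    rw [ih]
    rfl

lemma pvPairs_map_fst (es : List (String × String)) :
    (pvPairs es).map Prod.fst = es.flatMap (fun e => [e.1, e.2]) := by
  induction es with
  | nil => rfl
  | cons e t ih => simp [pvPairs, List.flatMap_cons] at ih ⊢; exact ih

lemma pvAdj_keys (es : List (String × String)) : (pvAdj es).keys = pvNodes es := by
  rw [pvAdj_eq_pairs]
  rw [PySem.Dict.keys_foldl_modify_key (pvPairs es) Prod.fst []
    (fun _ p => fun ns => ns ++ [p.2]) PySem.Dict.empty]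
  rw [PySem.Dict.keys_empty, pvPairs_map_fst]
  unfold pvNodes
  rw [PySem.Set.ofList_eq_foldl]
  rfl

lemma mem_pvAdj {es : List (String × String)} {u v : String} :
    v ∈ (pvAdj es).getD u [] ↔ pvEdgeR es u v := by
  rw [pvAdj_eq_pairs, PySem.Dict.getD_foldl_modify_append, PySem.Dict.getD_empty,
    List.nil_append]
  rw [List.mem_map]
  unfold pvEdgeR
  constructor
  · rintro ⟨p, hp, rfl⟩
    rw [List.mem_filter] at hp
    obtain ⟨hp1, hp2⟩ := hp
    unfold pvPairs at hp1
    rw [List.mem_flatMap] at hp1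
    obtain ⟨e, he, hpe⟩ := hp1
    simp only [List.mem_cons, List.not_mem_nil, or_false] at hpe
    have hu : p.1 = u := by simpa using hp2
    rcases hpe with rfl | rfl
    · exact Or.inl (by rw [← hu]; exact he)
    · exact Or.inr (by rw [← hu]; exact he)
  · intro h
    refine ⟨(u, v), ?_, rfl⟩
    rw [List.mem_filter]
    refine ⟨?_, by simp⟩
    unfold pvPairs
    rw [List.mem_flatMap]
    rcases h with h | h
    · exact ⟨(u, v), h, by simp⟩
    · exact ⟨(v, u), h, by simp⟩

lemma pvAdj_size (es : List (String × String)) : (pvAdj es).size = (pvKs es).length := by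
  have h1 : (pvAdj es).size = (pvAdj es).keys.length := by
    simp [PySem.Dict.size, PySem.Dict.keys]
  rw [h1, pvAdj_keys, pvKs_eq]

lemma nbr_mem_Ks {es : List (String × String)} {u v : String}
    (h : v ∈ (pvAdj es).getD u []) : v ∈ pvKs es := by
  rw [mem_pvAdj] at h
  rw [pvKs_eq, mem_pvNodes]
  rcases h with h | h
  · exact ⟨(u, v), h, Or.inr rfl⟩
  · exact ⟨(v, u), h, Or.inl rfl⟩

-- ---- B side: BFS ----
lemma bfs_inner (adj : PySem.Dict String (List String)) (nbrs : List String) :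
    ∀ (comp : List String), comp.Nodup →
    ((nbrs.foldl (fun (st : List String × PySem.Set String) v =>
        if PySem.Set.contains st.2 v then st
        else (st.1 ++ [v], PySem.Set.add st.2 v)) (comp, comp)).2
      = (nbrs.foldl (fun (st : List String × PySem.Set String) v =>
        if PySem.Set.contains st.2 v then st
        else (st.1 ++ [v], PySem.Set.add st.2 v)) (comp, comp)).1) ∧
    (nbrs.foldl (fun (st : List String × PySem.Set String) v =>
        if PySem.Set.contains st.2 v then st
        else (st.1 ++ [v], PySem.Set.add st.2 v)) (comp, comp)).1.Nodup ∧
    (∃ ext, (nbrs.foldl (fun (st : List String × PySem.Set String) v =>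
        if PySem.Set.contains st.2 v then st
        else (st.1 ++ [v], PySem.Set.add st.2 v)) (comp, comp)).1 = comp ++ ext) ∧
    (∀ y, y ∈ (nbrs.foldl (fun (st : List String × PySem.Set String) v =>
        if PySem.Set.contains st.2 v then st
        else (st.1 ++ [v], PySem.Set.add st.2 v)) (comp, comp)).1 ↔ y ∈ comp ∨ y ∈ nbrs) := by
  induction nbrs with
  | nil =>
    intro comp hnd
    exact ⟨rfl, hnd, ⟨[], by simp⟩, fun y => by simp⟩
  | cons v vs ih =>
    intro comp hnd
    rw [List.foldl_cons]
    by_cases hv : v ∈ comp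
    · rw [if_pos (by rw [PySem.Set.contains_iff]; exact hv)]
      obtain ⟨h1, h2, ⟨ext, h3⟩, h4⟩ := ih comp hnd
      refine ⟨h1, h2, ⟨ext, h3⟩, fun y => ?_⟩
      rw [h4 y]
      constructor
      · rintro (h | h)
        exacts [Or.inl h, Or.inr (List.mem_cons_of_mem _ h)]
      · rintro (h | h)
        · exact Or.inl h
        · rcases List.mem_cons.mp h with rfl | h
          exacts [Or.inl hv, Or.inr h]
    · rw [if_neg (by rw [PySem.Set.contains_iff]; exact hv)]
      rw [set_add_not_mem hv]
      have hnd' : (comp ++ [v]).Nodup :=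
        List.Nodup.append hnd (List.nodup_singleton v)
          (fun a ha hav => hv ((List.mem_singleton.mp hav) ▸ ha))
      obtain ⟨h1, h2, ⟨ext, h3⟩, h4⟩ := ih (comp ++ [v]) hnd'
      refine ⟨h1, h2, ⟨[v] ++ ext, by rw [h3, List.append_assoc]⟩, fun y => ?_⟩
      rw [h4 y]
      simp only [List.mem_append, List.mem_singleton, List.mem_cons]
      tauto

lemma bfsB_spec {es : List (String × String)} {start : String} :
    ∀ (fuel : Nat) (comp : List String) (i : Nat),
    comp.Nodup → (∀ y ∈ comp, y ∈ pvKs es) → (∀ y ∈ comp, pvConn es start y) →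
    i ≤ comp.length →
    (∀ j, (hj : j < comp.length) → j < i → ∀ v ∈ (pvAdj es).getD comp[j] [], v ∈ comp) →
    (pvKs es).length + 1 ≤ fuel + i →
    ((bfsB (pvAdj es) fuel comp comp i).Nodup ∧
     (∀ y ∈ bfsB (pvAdj es) fuel comp comp i, y ∈ pvKs es) ∧
     (∀ y ∈ bfsB (pvAdj es) fuel comp comp i, pvConn es start y) ∧
     (∀ y ∈ comp, y ∈ bfsB (pvAdj es) fuel comp comp i) ∧
     (∀ u ∈ bfsB (pvAdj es) fuel comp comp i, ∀ v ∈ (pvAdj es).getD u [], v ∈ bfsB (pvAdj es) fuel comp comp i)) := by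
  intro fuel
  induction fuel with
  | zero =>
    intro comp i hnd hks hconn hi hproc hfuel
    have hlen : comp.length ≤ (pvKs es).length := nodup_length_le hnd hks
    have hclose : ∀ u ∈ comp, ∀ v ∈ (pvAdj es).getD u [], v ∈ comp := by
      intro u hu v hv
      obtain ⟨j, hj, rfl⟩ := List.getElem_of_mem hu
      exact hproc j hj (by omega) v hv
    exact ⟨hnd, hks, hconn, fun y hy => hy, hclose⟩
  | succ fuel ih =>
    intro comp i hnd hks hconn hi hproc hfuel
    by_cases hil : i < comp.length
    · obtain ⟨heq2, hnd', ⟨ext, hext⟩, hmem'⟩ :=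
        bfs_inner (pvAdj es) ((pvAdj es).getD comp[i] []) comp hnd
      set stt := (((pvAdj es).getD comp[i] []).foldl (fun (st : List String × PySem.Set String) v =>
        if PySem.Set.contains st.2 v then st
        else (st.1 ++ [v], PySem.Set.add st.2 v)) (comp, comp)) with hstt
      have hstep : bfsB (pvAdj es) (fuel + 1) comp comp i
          = bfsB (pvAdj es) fuel stt.1 stt.1 (i + 1) := by
        rw [bfsB, dif_pos hil]
        show bfsB (pvAdj es) fuel stt.1 stt.2 (i + 1) = _
        rw [heq2]
      rw [hstep]
      have hui : comp[i] ∈ comp := List.getElem_mem hil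
      have hks' : ∀ y ∈ stt.1, y ∈ pvKs es := by
        intro y hy
        rcases (hmem' y).mp hy with h | h
        · exact hks y h
        · exact nbr_mem_Ks h
      have hconn' : ∀ y ∈ stt.1, pvConn es start y := by
        intro y hy
        rcases (hmem' y).mp hy with h | h
        · exact hconn y h
        · exact (hconn _ hui).tail (mem_pvAdj.mp h)
      have hlen' : comp.length ≤ stt.1.length := by rw [hext]; simp
      have hproc' : ∀ j, (hj : j < stt.1.length) → j < i + 1 →
          ∀ v ∈ (pvAdj es).getD stt.1[j] [], v ∈ stt.1 := by
        intro j hj hji v hv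
        have hjc : j < comp.length := by omega
        have hgj : stt.1[j] = comp[j] := by
          have h1 := List.getElem_of_eq hext hj
          rw [h1]
          exact List.getElem_append_left hjc
        rw [hgj] at hv
        rcases Nat.lt_or_ge j i with hlt | hge
        · exact (hmem' v).mpr (Or.inl (hproc j hjc hlt v hv))
        · have hjeq : j = i := by omega
          subst hjeq
          exact (hmem' v).mpr (Or.inr hv)
      exact ih stt.1 (i + 1) hnd' hks' hconn' (by omega) hproc' (by omega) |>.imp id
        (fun h => h.imp id (fun h => h.imp id (fun h =>
          ⟨fun y hy => h.1 y ((hmem' y).mpr (Or.inl hy)), h.2⟩)))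
    · have hstep : bfsB (pvAdj es) (fuel + 1) comp comp i = comp := by
        rw [bfsB, dif_neg hil]
      rw [hstep]
      have hclose : ∀ u ∈ comp, ∀ v ∈ (pvAdj es).getD u [], v ∈ comp := by
        intro u hu v hv
        obtain ⟨j, hj, rfl⟩ := List.getElem_of_mem hu
        exact hproc j hj (by omega) v hv
      exact ⟨hnd, hks, hconn, fun y hy => hy, hclose⟩

def pvComp (es : List (String × String)) (start : String) : List String :=
  bfsB (pvAdj es) ((pvAdj es).size + 1) [start] [start] 0

lemma pvComp_spec {es : List (String × String)} {start : String} (hs : start ∈ pvKs es) :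
    (pvComp es start).Nodup ∧
    (∀ y, y ∈ pvComp es start ↔ y ∈ pvKs es ∧ pvConn es start y) := by
  obtain ⟨hnd, hks, hconn, hincl, hclose⟩ :=
    bfsB_spec (es := es) (start := start) ((pvAdj es).size + 1) [start] 0
      (List.nodup_singleton start)
      (by intro y hy; rw [List.mem_singleton] at hy; subst hy; exact hs)
      (by intro y hy; rw [List.mem_singleton] at hy; subst hy; exact Relation.ReflTransGen.refl)
      (by simp)
      (by intro j hj hji; exact absurd hji (Nat.not_lt_zero j))
      (by rw [pvAdj_size])
  refine ⟨hnd, fun y => ⟨fun hy => ⟨hks y hy, hconn y hy⟩, ?_⟩⟩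
  rintro ⟨hyk, hcy⟩
  have hstart : start ∈ pvComp es start := hincl start (by simp)
  clear hyk
  induction hcy with
  | refl => exact hstart
  | @tail b c _ hstep ihc =>
    exact hclose b ihc c (mem_pvAdj.mpr hstep)

lemma pvComp_cls {es : List (String × String)} {start : String} (hs : start ∈ pvKs es) :
    ∀ y, y ∈ pvComp es start ↔ y ∈ pvCls es (pvRoot es start) := by
  intro y
  rw [(pvComp_spec hs).2 y, mem_pvCls]
  constructor
  · rintro ⟨h1, h2⟩
    exact ⟨h1, (root_eq_iff_conn h1 hs).mpr (conn_symm _ h2)⟩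
  · rintro ⟨h1, h2⟩
    exact ⟨h1, conn_symm _ ((root_eq_iff_conn h1 hs).mp h2)⟩

-- ---- B side: the outer loop over the nodes ----
def pvStep (es : List (String × String))
    (st : List (String × String × Int) × PySem.Set String) (start : String) :
    List (String × String × Int) × PySem.Set String :=
  if PySem.Set.contains st.2 start then st
  else
    let comp := bfsB (pvAdj es) ((pvAdj es).size + 1) [start] (PySem.Set.add PySem.Set.empty start) 0
    let seen := PySem.Set.update st.2 comp
    if comp.length < 2 then (st.1, seen)
    else
      let gk := (PySem.List.min? comp (fun m => m)).getD ""
      (st.1 ++ comp.map (fun m => (m, gk, (comp.length : Int))), seen)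

lemma set_add_empty (x : String) : PySem.Set.add PySem.Set.empty x = [x] := by
  simp [PySem.Set.add, PySem.Set.contains, PySem.Set.empty]

lemma pvStep_seen {es : List (String × String)}
    {st : List (String × String × Int) × PySem.Set String} {start : String}
    (hc : PySem.Set.contains st.2 start = true) : pvStep es st start = st := by
  unfold pvStep
  rw [if_pos hc]

lemma pvStep_not_seen {es : List (String × String)}
    {st : List (String × String × Int) × PySem.Set String} {start : String}
    (hc : ¬ PySem.Set.contains st.2 start = true) :
    pvStep es st start =
      (if (pvComp es start).length < 2 then (st.1, PySem.Set.update st.2 (pvComp es start))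
       else (st.1 ++ (pvComp es start).map
          (fun m => (m, (PySem.List.min? (pvComp es start) (fun m => m)).getD "",
            ((pvComp es start).length : Int))),
          PySem.Set.update st.2 (pvComp es start))) := by
  unfold pvStep pvComp
  rw [if_neg hc, set_add_empty]

lemma outer_fold (es : List (String × String)) :
    ∀ (ks2 ks1 : List String) (rows : List (String × String × Int)) (seen : PySem.Set String),
    ks1 ++ ks2 = pvKs es →
    (∀ y, y ∈ seen ↔ (y ∈ pvKs es ∧ ∃ x ∈ ks1, pvConn es x y)) →
    (∀ t, t ∈ rows ↔ (pvRowOK es t ∧ ∃ x ∈ ks1, pvConn es x t.1)) →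
    rows.Nodup →
    ((ks2.foldl (pvStep es) (rows, seen)).1.Nodup ∧
     ∀ t, t ∈ (ks2.foldl (pvStep es) (rows, seen)).1 ↔
       (pvRowOK es t ∧ ∃ x ∈ ks1 ++ ks2, pvConn es x t.1)) := by
  intro ks2
  induction ks2 with
  | nil =>
    intro ks1 rows seen _ _ hrows hnd
    exact ⟨hnd, by simpa using hrows⟩
  | cons start t ih =>
    intro ks1 rows seen heq hseen hrows hnd
    rw [List.foldl_cons]
    have heq' : (ks1 ++ [start]) ++ t = pvKs es := by
      rw [List.append_assoc]
      simpa using heq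
    have hstartKs : start ∈ pvKs es := by
      rw [← heq]
      simp
    have hfinish : ∀ (rows' : List (String × String × Int)) (seen' : PySem.Set String),
        (∀ y, y ∈ seen' ↔ (y ∈ pvKs es ∧ ∃ x ∈ ks1 ++ [start], pvConn es x y)) →
        (∀ t', t' ∈ rows' ↔ (pvRowOK es t' ∧ ∃ x ∈ ks1 ++ [start], pvConn es x t'.1)) →
        rows'.Nodup →
        ((t.foldl (pvStep es) (rows', seen')).1.Nodup ∧
         ∀ t', t' ∈ (t.foldl (pvStep es) (rows', seen')).1 ↔
           (pvRowOK es t' ∧ ∃ x ∈ ks1 ++ start :: t, pvConn es x t'.1)) := by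
      intro rows' seen' hseen' hrows' hnd'
      obtain ⟨h1, h2⟩ := ih (ks1 ++ [start]) rows' seen' heq' hseen' hrows' hnd'
      refine ⟨h1, fun t' => (h2 t').trans ?_⟩
      constructor
      · rintro ⟨hok, x, hx, hconn⟩
        refine ⟨hok, x, ?_, hconn⟩
        rw [List.append_assoc] at hx
        simpa using hx
      · rintro ⟨hok, x, hx, hconn⟩
        refine ⟨hok, x, ?_, hconn⟩
        rw [List.append_assoc]
        simpa using hx
    by_cases hc : PySem.Set.contains seen start = true
    · rw [pvStep_seen hc]
      have hss : start ∈ seen := (PySem.Set.contains_iff _ _).mp hc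
      obtain ⟨hsk, x0, hx0, hcx0⟩ := (hseen start).mp hss
      apply hfinish rows seen
      · intro y
        rw [hseen y]
        constructor
        · rintro ⟨h1, x, hx, hconn⟩
          exact ⟨h1, x, List.mem_append_left _ hx, hconn⟩
        · rintro ⟨h1, x, hx, hconn⟩
          rcases List.mem_append.mp hx with hx | hx
          · exact ⟨h1, x, hx, hconn⟩
          · rw [List.mem_singleton] at hx
            subst hx
            exact ⟨h1, x0, hx0, conn_trans hcx0 hconn⟩
      · intro t'
        rw [hrows t']
        constructor
        · rintro ⟨hok, x, hx, hconn⟩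
          exact ⟨hok, x, List.mem_append_left _ hx, hconn⟩
        · rintro ⟨hok, x, hx, hconn⟩
          rcases List.mem_append.mp hx with hx | hx
          · exact ⟨hok, x, hx, hconn⟩
          · rw [List.mem_singleton] at hx
            subst hx
            exact ⟨hok, x0, hx0, conn_trans hcx0 hconn⟩
      · exact hnd
    · rw [pvStep_not_seen hc]
      have hstartnot : start ∉ seen := fun h => hc ((PySem.Set.contains_iff _ _).mpr h)
      have hcompnd := (pvComp_spec hstartKs).1
      have hcompmem := pvComp_cls hstartKs
      have hstartcomp : start ∈ pvComp es start :=
        (hcompmem start).mpr (self_mem_pvCls hstartKs)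
      have hlen : (pvComp es start).length = (pvCls es (pvRoot es start)).length :=
        length_eq_of_mem_iff hcompnd (pvCls_nodup es _) hcompmem
      have hseenU : ∀ y, y ∈ PySem.Set.update seen (pvComp es start) ↔
          (y ∈ pvKs es ∧ ∃ x ∈ ks1 ++ [start], pvConn es x y) := by
        intro y
        rw [PySem.Set.mem_update]
        constructor
        · rintro (hy | hy)
          · obtain ⟨h1, x, hx, hconn⟩ := (hseen y).mp hy
            exact ⟨h1, x, List.mem_append_left _ hx, hconn⟩
          · have := (hcompmem y).mp hy
            obtain ⟨h1, h2⟩ := mem_pvCls.mp this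
            refine ⟨h1, start, by simp, ?_⟩
            exact conn_symm _ ((root_eq_iff_conn h1 hstartKs).mp h2)
        · rintro ⟨h1, x, hx, hconn⟩
          rcases List.mem_append.mp hx with hx | hx
          · exact Or.inl ((hseen y).mpr ⟨h1, x, hx, hconn⟩)
          · rw [List.mem_singleton] at hx
            subst hx
            refine Or.inr ((hcompmem y).mpr (mem_pvCls.mpr ⟨h1, ?_⟩))
            exact (root_eq_iff_conn h1 hstartKs).mpr (conn_symm _ hconn)
      -- members of the component are not in seen
      have hdisj : ∀ y ∈ pvComp es start, y ∉ seen := by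
        intro y hy hys
        obtain ⟨h1, x, hx, hconn⟩ := (hseen y).mp hys
        obtain ⟨hyk, hroot⟩ := mem_pvCls.mp ((hcompmem y).mp hy)
        have hcsy : pvConn es start y :=
          conn_symm _ ((root_eq_iff_conn hyk hstartKs).mp hroot)
        exact hstartnot ((hseen start).mpr ⟨hstartKs, x, hx, conn_trans hconn (conn_symm _ hcsy)⟩)
      split
      · rename_i hsmall
        apply hfinish rows _ hseenU _ hnd
        intro t'
        rw [hrows t']
        constructor
        · rintro ⟨hok, x, hx, hconn⟩
          exact ⟨hok, x, List.mem_append_left _ hx, hconn⟩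
        · rintro ⟨hok, x, hx, hconn⟩
          rcases List.mem_append.mp hx with hx | hx
          · exact ⟨hok, x, hx, hconn⟩
          · rw [List.mem_singleton] at hx
            exfalso
            -- t'.1 is connected to start, so its class is start's class, of size < 2
            obtain ⟨h1k, h2, _, _⟩ := hok
            have hre : pvRoot es t'.1 = pvRoot es start :=
              (root_eq_iff_conn h1k hstartKs).mpr (conn_symm _ (hx ▸ hconn))
            rw [hre, ← hlen] at h2
            omega
      · rename_i hbig
        have hclsmin : (PySem.List.min? (pvComp es start) (fun m => m)).getD ""
            = (PySem.List.min? (pvCls es (pvRoot es start)) (fun y => y)).getD "" := by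
          obtain ⟨m1, hm1⟩ : ∃ m1, PySem.List.min? (pvComp es start) (fun m => m) = some m1 := by
            rcases h : PySem.List.min? (pvComp es start) (fun m => m) with _ | m1
            · rw [PySem.List.min?_eq_none_iff] at h
              rw [h] at hstartcomp
              cases hstartcomp
            · exact ⟨m1, rfl⟩
          obtain ⟨m2, hm2⟩ : ∃ m2, PySem.List.min? (pvCls es (pvRoot es start)) (fun y => y) = some m2 := by
            rcases h : PySem.List.min? (pvCls es (pvRoot es start)) (fun y => y) with _ | m2
            · rw [PySem.List.min?_eq_none_iff] at h
              have := self_mem_pvCls hstartKs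
              rw [h] at this
              cases this
            · exact ⟨m2, rfl⟩
          rw [hm1, hm2]
          exact min?_id_unique hcompmem hm1 hm2
        -- block of new rows
        have hblock : ∀ t', t' ∈ (pvComp es start).map
            (fun m => (m, (PySem.List.min? (pvComp es start) (fun m => m)).getD "",
              ((pvComp es start).length : Int))) ↔
            (pvRowOK es t' ∧ pvConn es start t'.1) := by
          intro t'
          rw [List.mem_map]
          constructor
          · rintro ⟨m, hm, rfl⟩
            obtain ⟨hmk, hmr⟩ := mem_pvCls.mp ((hcompmem m).mp hm)
            refine ⟨⟨hmk, ?_, ?_, ?_⟩, ?_⟩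
            · rw [hmr, ← hlen]; omega
            · rw [hmr]
              exact hclsmin
            · rw [hmr, ← hlen]
            · exact conn_symm _ ((root_eq_iff_conn hmk hstartKs).mp hmr)
          · rintro ⟨⟨h1k, h2, h3, h4⟩, hconn⟩
            have hroott : pvRoot es t'.1 = pvRoot es start :=
              (root_eq_iff_conn h1k hstartKs).mpr (conn_symm _ hconn)
            refine ⟨t'.1, (hcompmem t'.1).mpr (mem_pvCls.mpr ⟨h1k, hroott⟩), ?_⟩
            obtain ⟨a, b, c⟩ := t'
            simp only at h3 h4 hroott ⊢
            rw [h3, h4, hroott, hclsmin, hlen]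
        apply hfinish _ _ hseenU
        · intro t'
          rw [List.mem_append, hrows t', hblock t']
          constructor
          · rintro (⟨hok, x, hx, hconn⟩ | ⟨hok, hconn⟩)
            · exact ⟨hok, x, List.mem_append_left _ hx, hconn⟩
            · exact ⟨hok, start, by simp, hconn⟩
          · rintro ⟨hok, x, hx, hconn⟩
            rcases List.mem_append.mp hx with hx | hx
            · exact Or.inl ⟨hok, x, hx, hconn⟩
            · rw [List.mem_singleton] at hx
              subst hx
              exact Or.inr ⟨hok, hconn⟩
        · rw [List.nodup_append]
          refine ⟨hnd, ?_, ?_⟩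
          · exact hcompnd.map (fun a b h => congrArg Prod.fst h)
          · intro t1 ht1 t2 ht2 heqt
            subst heqt
            obtain ⟨hok1, x, hx, hconn⟩ := (hrows t1).mp ht1
            obtain ⟨_, hconn2⟩ := (hblock t1).mp ht2
            have ht1comp : t1.1 ∈ pvComp es start := by
              refine (hcompmem t1.1).mpr (mem_pvCls.mpr ⟨hok1.1, ?_⟩)
              exact (root_eq_iff_conn hok1.1 hstartKs).mpr (conn_symm _ hconn2)
            exact hdisj t1.1 ht1comp ((hseen t1.1).mpr ⟨hok1.1, x, hx, hconn⟩)

-- ---- final assembly ----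
lemma rowsB_eq (es : List (String × String)) :
    owner_group_rows_alt es =
      PySem.List.sorted (((pvAdj es).keys.foldl (pvStep es) ([], PySem.Set.empty)).1) pvKey3 := rfl

lemma rowsB_facts (es : List (String × String)) :
    (((pvAdj es).keys.foldl (pvStep es) ([], PySem.Set.empty)).1.Nodup ∧
     ∀ t, t ∈ ((pvAdj es).keys.foldl (pvStep es) ([], PySem.Set.empty)).1 ↔ pvRowOK es t) := by
  have hkeq : (pvAdj es).keys = pvKs es := by rw [pvAdj_keys, pvKs_eq]
  obtain ⟨h1, h2⟩ := outer_fold es ((pvAdj es).keys) [] [] PySem.Set.empty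
    (by rw [List.nil_append]; exact hkeq)
    (by intro y; simp [PySem.Set.empty])
    (by intro t; simp)
    List.nodup_nil
  refine ⟨h1, fun t => (h2 t).trans ?_⟩
  rw [List.nil_append, hkeq]
  constructor
  · rintro ⟨hok, _⟩
    exact hok
  · intro hok
    exact ⟨hok, t.1, hok.1, Relation.ReflTransGen.refl⟩

lemma rowsB_perm (es : List (String × String)) :
    (((pvAdj es).keys.foldl (pvStep es) ([], PySem.Set.empty)).1).Perm (pvRowsA es) := by
  obtain ⟨h1, h2⟩ := rowsB_facts es
  rw [List.perm_ext_iff_of_nodup h1 (pvRowsA_nodup es)]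
  intro t
  rw [h2 t, mem_pvRowsA]

lemma pvKey3_inj : Function.Injective pvKey3 := by
  intro a b h
  unfold pvKey3 at h
  have h1 := toLex.injective h
  obtain ⟨a1, a2, a3⟩ := a
  obtain ⟨b1, b2, b3⟩ := b
  simp only [Prod.mk.injEq] at h1
  obtain ⟨h2, h3⟩ := h1
  have h4 := toLex.injective h3
  simp only [Prod.mk.injEq] at h4
  simp [h2, h4.1, h4.2]

lemma sorted_rows_eq {xs ys : List (String × String × Int)}
    (hperm : ys.Perm xs) (hynd : ys.Nodup) :
    PySem.List.sorted xs pvKey3 = PySem.List.sorted ys pvKey3 := by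
  apply PySem.List.sorted_eq_of_perm_of_pairwise_lt
  · exact (PySem.List.sorted_perm ys pvKey3 false).trans hperm
  · have hp := PySem.List.sorted_pairwise ys pvKey3
    have hnd2 : (PySem.List.sorted ys pvKey3 false).Nodup :=
      ((PySem.List.sorted_perm ys pvKey3 false).nodup_iff).mpr hynd
    have hboth := hp.and hnd2
    exact hboth.imp (fun hab => lt_of_le_of_ne hab.1 (fun hk => hab.2 (pvKey3_inj hk)))

-- ===== VERDICT (by name: the statement is the Claim_ definition above) =====
theorem owner_group_rows_spec : Claim_equal_owner_group_rows := by
  intro es _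
  show owner_group_rows es = owner_group_rows_alt es
  rw [rowsA_eq, rowsB_eq]
  exact sorted_rows_eq (rowsB_perm es) (rowsB_facts es).1
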